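-- pv_equiv track=rewrite | github.com/sharonLuo/LeetCode_py | 5sum.py | fiveSum
-- ===== SOURCE A (Python) =====
-- def fiveSum(nums, target):
--     nums.sort()
--     rst = []
--     for n in range(len(nums)-4):
--         if n > 0 and nums[n-1] == nums[n]:
--             continue
--         for m in range(n+1, len(nums)-3):
--             if nums[m-1] == nums[m] and m-n > 1:  ### m-n >1 is important (test [-4,-3,-3,-2,-1,0,1,2,5,7])
--                 continue
--             for i in range(m+1, len(nums)-2):
--                 if nums[i-1] == nums[i] and i-m > 1: ### i-m >1 is important
--                     continue
--                 j, k = i+1, len(nums)-1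
--                 while j < k :
--                     if nums[j] + nums[k] < target-nums[i]-nums[m]-nums[n]:
--                         j += 1
--                     elif nums[j] + nums[k] > target-nums[i]-nums[m]-nums[n]:
--                         k -= 1
--                     else:
--                         rst.append([nums[n], nums[m], nums[i], nums[j], nums[k]])
--                         j += 1
--                         k -= 1
--                         while j < k and nums[j] == nums[j-1]:
--                             j += 1
--                         while j < k and nums[k] == nums[k+1]:
--                             k -= 1
--     return rst
-- ===== SOURCE B (Python) =====
-- def fiveSum(nums, target):
--     # Generic recursive k-sum decomposition; returns same results in the same order as
--     # the hard-coded 5-level loop. (Like A, this sorts nums in place.)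
--     nums.sort()
--     n = len(nums)
--
--     def kSum(start, k, t):
--         res = []
--         if k == 2:
--             j, e = start, n - 1
--             while j < e:
--                 s = nums[j] + nums[e]
--                 if s < t:
--                     j += 1
--                 elif s > t:
--                     e -= 1
--                 else:
--                     res.append([nums[j], nums[e]])
--                     j += 1
--                     e -= 1
--                     while j < e and nums[j] == nums[j - 1]:
--                         j += 1
--                     while j < e and nums[e] == nums[e + 1]:
--                         e -= 1
--             return res
--         for i in range(start, n - (k - 1)):
--             if i > start and nums[i] == nums[i - 1]:
--                 continue
--             for sub in kSum(i + 1, k - 1, t - nums[i]):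
--                 res.append([nums[i]] + sub)
--         return res
--
--     return kSum(0, 5, target)
-- ===== Notes on version B (the rewrite author's own statement) =====
-- stated objective: alternative
-- what changed: Replaces A's five hard-coded nested loop levels (n, m, i plus a two-pointer scan) with one generic recursive kSum(start, k, target) helper that handles every level uniformly and runs the two-pointer scan at k == 2.
import Mathlib
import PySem

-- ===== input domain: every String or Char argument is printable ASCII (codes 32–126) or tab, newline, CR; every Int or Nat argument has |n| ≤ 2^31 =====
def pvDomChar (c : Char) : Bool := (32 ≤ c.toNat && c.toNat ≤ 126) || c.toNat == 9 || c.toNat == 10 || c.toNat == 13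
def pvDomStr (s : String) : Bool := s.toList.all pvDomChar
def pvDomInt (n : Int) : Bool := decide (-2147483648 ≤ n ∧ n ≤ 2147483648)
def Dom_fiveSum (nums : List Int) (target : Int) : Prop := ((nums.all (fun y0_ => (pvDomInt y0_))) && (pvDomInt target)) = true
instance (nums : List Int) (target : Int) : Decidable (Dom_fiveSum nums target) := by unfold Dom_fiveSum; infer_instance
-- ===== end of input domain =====

-- B replaces A's five hard-coded loop levels by one generic recursive kSum(start,k,target)
-- helper (objective: alternative decomposition, same cost). Both Pythons sort nums in place;
-- the equivalence proved here is about the RETURN value only.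

-- ===== PORT A =====
-- xs[i]: every index A reads is in range, so the default is never returned.
def pvGet (xs : List Int) (i : Int) : Int := PySem.List.pyGetD xs i 0

-- 'while j < k and nums[j] == nums[j-1]: j += 1'  (shared verbatim by both Pythons)
def skipJ (xs : List Int) (j e : Int) : Int :=
  if j < e ∧ pvGet xs j = pvGet xs (j - 1) then skipJ xs (j + 1) e else j
termination_by (e - j).toNat
decreasing_by omega

-- 'while j < k and nums[k] == nums[k+1]: k -= 1'  (shared verbatim by both Pythons)
def skipE (xs : List Int) (j e : Int) : Int :=
  if j < e ∧ pvGet xs e = pvGet xs (e + 1) then skipE xs j (e - 1) else e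
termination_by (e - j).toNat
decreasing_by omega

theorem le_skipJ (xs : List Int) (j e : Int) : j ≤ skipJ xs j e := by
  rw [skipJ]
  split_ifs with h
  · have := le_skipJ xs (j + 1) e; omega
  · omega
termination_by (e - j).toNat
decreasing_by omega

theorem skipE_le (xs : List Int) (j e : Int) : skipE xs j e ≤ e := by
  rw [skipE]
  split_ifs with h
  · have := skipE_le xs j (e - 1); omega
  · omega
termination_by (e - j).toNat
decreasing_by omega

-- A's innermost two-pointer 'while j < k' loop; vn vm vi are nums[n], nums[m], nums[i].
def twoPtrA (xs : List Int) (t vn vm vi : Int) (j e : Int) (acc : List (List Int)) :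
    List (List Int) :=
  if h : j < e then
    if pvGet xs j + pvGet xs e < t then
      twoPtrA xs t vn vm vi (j + 1) e acc
    else if t < pvGet xs j + pvGet xs e then
      twoPtrA xs t vn vm vi j (e - 1) acc
    else
      twoPtrA xs t vn vm vi (skipJ xs (j + 1) (e - 1))
        (skipE xs (skipJ xs (j + 1) (e - 1)) (e - 1))
        (acc ++ [[vn, vm, vi, pvGet xs j, pvGet xs e]])
  else acc
termination_by (e - j).toNat
decreasing_by
  · omega
  · omega
  · have h1 := le_skipJ xs (j + 1) (e - 1)
    have h2 := skipE_le xs (skipJ xs (j + 1) (e - 1)) (e - 1)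
    omega

-- 'for i in range(m+1, len(nums)-2): …'
def loopI (xs : List Int) (t n m : Int) (rst : List (List Int)) : List (List Int) :=
  (PySem.List.pyRange (m + 1) ((xs.length : Int) - 2) 1).foldl
    (fun rst i =>
      if pvGet xs (i - 1) = pvGet xs i ∧ 1 < i - m then rst
      else twoPtrA xs (t - pvGet xs i - pvGet xs m - pvGet xs n)
        (pvGet xs n) (pvGet xs m) (pvGet xs i) (i + 1) ((xs.length : Int) - 1) rst)
    rst

-- 'for m in range(n+1, len(nums)-3): …'
def loopM (xs : List Int) (t n : Int) (rst : List (List Int)) : List (List Int) :=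
  (PySem.List.pyRange (n + 1) ((xs.length : Int) - 3) 1).foldl
    (fun rst m =>
      if pvGet xs (m - 1) = pvGet xs m ∧ 1 < m - n then rst
      else loopI xs t n m rst)
    rst

def fiveSum (nums : List Int) (target : Int) : List (List Int) :=
  let xs := PySem.List.sorted nums (fun x => x) false
  (PySem.List.pyRange 0 ((xs.length : Int) - 4) 1).foldl
    (fun rst n =>
      if 0 < n ∧ pvGet xs (n - 1) = pvGet xs n then rst
      else loopM xs target n rst)
    []

-- ===== PORT B =====
-- B's base-case two-pointer scan (k == 2), appending the pairs [nums[j], nums[e]].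
def twoPair (xs : List Int) (t : Int) (j e : Int) (res : List (List Int)) :
    List (List Int) :=
  if h : j < e then
    if pvGet xs j + pvGet xs e < t then
      twoPair xs t (j + 1) e res
    else if t < pvGet xs j + pvGet xs e then
      twoPair xs t j (e - 1) res
    else
      twoPair xs t (skipJ xs (j + 1) (e - 1))
        (skipE xs (skipJ xs (j + 1) (e - 1)) (e - 1))
        (res ++ [[pvGet xs j, pvGet xs e]])
  else res
termination_by (e - j).toNat
decreasing_by
  · omega
  · omega
  · have h1 := le_skipJ xs (j + 1) (e - 1)
    have h2 := skipE_le xs (skipJ xs (j + 1) (e - 1)) (e - 1)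
    omega

-- kSum(start, k, t): Python B's recursive helper (k = 0, 1 are never reached from the entry).
def kSum (xs : List Int) (k : Nat) (start t : Int) : List (List Int) :=
  match k with
  | 0 => []
  | 1 => []
  | 2 => twoPair xs t start ((xs.length : Int) - 1) []
  | k' + 1 =>
    (PySem.List.pyRange start ((xs.length : Int) - (k' : Int)) 1).foldl
      (fun res i =>
        if start < i ∧ pvGet xs i = pvGet xs (i - 1) then res
        else res ++ (kSum xs k' (i + 1) (t - pvGet xs i)).map (fun sub => pvGet xs i :: sub))
      []

def fiveSum_alt (nums : List Int) (target : Int) : List (List Int) :=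
  kSum (PySem.List.sorted nums (fun x => x) false) 5 0 target

-- ===== PRECONDITION & SPEC =====
def Spec_fiveSum (nums : List Int) (target : Int) (out : List (List Int)) : Prop := out = fiveSum_alt nums target
instance (nums : List Int) (target : Int) (out : List (List Int)) : Decidable (Spec_fiveSum nums target out) := by unfold Spec_fiveSum; infer_instance

-- ===== CLAIM (what is proved, stated in full; the proofs are below) =====
def Claim_equal_fiveSum : Prop := ∀ (nums : List Int) (target : Int), Dom_fiveSum nums target → Spec_fiveSum nums target (fiveSum nums target)

-- ===== LEMMAS AND PROOFS =====

theorem twoPair_acc (xs : List Int) (t j e : Int) (res : List (List Int)) :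
    twoPair xs t j e res = res ++ twoPair xs t j e [] := by
  conv_rhs => rw [twoPair]
  rw [twoPair]
  split_ifs with h1 h2 h3
  · exact twoPair_acc xs t (j + 1) e res
  · exact twoPair_acc xs t j (e - 1) res
  · rw [twoPair_acc xs t _ _ (res ++ [[pvGet xs j, pvGet xs e]]),
      twoPair_acc xs t _ _ ([] ++ [[pvGet xs j, pvGet xs e]])]
    simp
  · simp
termination_by (e - j).toNat
decreasing_by
  · omega
  · omega
  · have h4 := le_skipJ xs (j + 1) (e - 1)
    have h5 := skipE_le xs (skipJ xs (j + 1) (e - 1)) (e - 1)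
    omega
  · have h4 := le_skipJ xs (j + 1) (e - 1)
    have h5 := skipE_le xs (skipJ xs (j + 1) (e - 1)) (e - 1)
    omega

theorem twoPtrA_acc (xs : List Int) (t vn vm vi j e : Int) (acc : List (List Int)) :
    twoPtrA xs t vn vm vi j e acc = acc ++ twoPtrA xs t vn vm vi j e [] := by
  conv_rhs => rw [twoPtrA]
  rw [twoPtrA]
  split_ifs with h1 h2 h3
  · exact twoPtrA_acc xs t vn vm vi (j + 1) e acc
  · exact twoPtrA_acc xs t vn vm vi j (e - 1) acc
  · rw [twoPtrA_acc xs t vn vm vi _ _ (acc ++ _), twoPtrA_acc xs t vn vm vi _ _ ([] ++ _)]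
    simp
  · simp
termination_by (e - j).toNat
decreasing_by
  · omega
  · omega
  · have h4 := le_skipJ xs (j + 1) (e - 1)
    have h5 := skipE_le xs (skipJ xs (j + 1) (e - 1)) (e - 1)
    omega
  · have h4 := le_skipJ xs (j + 1) (e - 1)
    have h5 := skipE_le xs (skipJ xs (j + 1) (e - 1)) (e - 1)
    omega

theorem twoPtrA_eq (xs : List Int) (t vn vm vi j e : Int) :
    twoPtrA xs t vn vm vi j e [] =
      (twoPair xs t j e []).map (fun s => vn :: vm :: vi :: s) := by
  conv_rhs => rw [twoPair]
  rw [twoPtrA]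
  split_ifs with h1 h2 h3
  · exact twoPtrA_eq xs t vn vm vi (j + 1) e
  · exact twoPtrA_eq xs t vn vm vi j (e - 1)
  · rw [twoPtrA_acc, twoPair_acc]
    rw [twoPtrA_eq xs t vn vm vi (skipJ xs (j + 1) (e - 1))
      (skipE xs (skipJ xs (j + 1) (e - 1)) (e - 1))]
    simp
  · simp
termination_by (e - j).toNat
decreasing_by
  · omega
  · omega
  · have h4 := le_skipJ xs (j + 1) (e - 1)
    have h5 := skipE_le xs (skipJ xs (j + 1) (e - 1)) (e - 1)
    omega

theorem if_append {α : Type} (c : Prop) [Decidable c] (res g : List α) :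
    (if c then res else res ++ g) = res ++ (if c then [] else g) := by
  split_ifs <;> simp

theorem kSum_three (xs : List Int) (start t : Int) :
    kSum xs 3 start t =
      (PySem.List.pyRange start ((xs.length : Int) - 2) 1).foldl
        (fun res i =>
          if start < i ∧ pvGet xs i = pvGet xs (i - 1) then res
          else res ++ (twoPair xs (t - pvGet xs i) (i + 1) ((xs.length : Int) - 1) []).map
            (fun sub => pvGet xs i :: sub)) [] := by
  rw [kSum]
  · norm_num [kSum]
  · omega
  · omega

theorem kSum_four (xs : List Int) (start t : Int) :
    kSum xs 4 start t =
      (PySem.List.pyRange start ((xs.length : Int) - 3) 1).foldl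
        (fun res i =>
          if start < i ∧ pvGet xs i = pvGet xs (i - 1) then res
          else res ++ (kSum xs 3 (i + 1) (t - pvGet xs i)).map
            (fun sub => pvGet xs i :: sub)) [] := by
  rw [kSum]
  · norm_num
  · omega
  · omega

theorem kSum_five (xs : List Int) (start t : Int) :
    kSum xs 5 start t =
      (PySem.List.pyRange start ((xs.length : Int) - 4) 1).foldl
        (fun res i =>
          if start < i ∧ pvGet xs i = pvGet xs (i - 1) then res
          else res ++ (kSum xs 4 (i + 1) (t - pvGet xs i)).map
            (fun sub => pvGet xs i :: sub)) [] := by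
  rw [kSum]
  · norm_num
  · omega
  · omega

theorem loopI_eq (xs : List Int) (t n m : Int) (rst : List (List Int)) :
    loopI xs t n m rst =
      rst ++ (kSum xs 3 (m + 1) (t - pvGet xs n - pvGet xs m)).map
        (fun s => pvGet xs n :: pvGet xs m :: s) := by
  rw [loopI, kSum_three]
  have hstep : (fun (rst : List (List Int)) (i : Int) =>
      if pvGet xs (i - 1) = pvGet xs i ∧ 1 < i - m then rst
      else twoPtrA xs (t - pvGet xs i - pvGet xs m - pvGet xs n)
        (pvGet xs n) (pvGet xs m) (pvGet xs i) (i + 1) ((xs.length : Int) - 1) rst)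
      = fun rst i => rst ++ (if pvGet xs (i - 1) = pvGet xs i ∧ 1 < i - m then []
        else (twoPair xs (t - pvGet xs i - pvGet xs m - pvGet xs n) (i + 1)
          ((xs.length : Int) - 1) []).map
            (fun s => pvGet xs n :: pvGet xs m :: pvGet xs i :: s)) := by
    funext rst i
    split_ifs with hc
    · simp
    · rw [twoPtrA_acc, twoPtrA_eq]
  rw [hstep, PySem.List.foldl_append_eq_flatMap]
  have hstep2 : (fun (res : List (List Int)) (i : Int) =>
      if m + 1 < i ∧ pvGet xs i = pvGet xs (i - 1) then res
      else res ++ (twoPair xs (t - pvGet xs n - pvGet xs m - pvGet xs i) (i + 1)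
        ((xs.length : Int) - 1) []).map (fun sub => pvGet xs i :: sub))
      = fun res i => res ++ (if m + 1 < i ∧ pvGet xs i = pvGet xs (i - 1) then []
        else (twoPair xs (t - pvGet xs n - pvGet xs m - pvGet xs i) (i + 1)
          ((xs.length : Int) - 1) []).map (fun sub => pvGet xs i :: sub)) := by
    funext res i
    exact if_append _ _ _
  rw [hstep2, PySem.List.foldl_append_eq_flatMap]
  simp only [List.nil_append]
  rw [List.map_flatMap]
  congr 1
  congr 1
  funext i
  have ht : t - pvGet xs n - pvGet xs m - pvGet xs i
      = t - pvGet xs i - pvGet xs m - pvGet xs n := by ring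
  rw [ht]
  by_cases h1 : pvGet xs (i - 1) = pvGet xs i <;> by_cases h2 : m + 1 < i
  · rw [if_pos ⟨h1, by omega⟩, if_pos ⟨h2, h1.symm⟩]; simp
  · rw [if_neg (fun hc => absurd (show m + 1 < i from by omega) h2),
      if_neg (fun hc => absurd hc.1 h2)]
    simp [List.map_map, Function.comp_def]
  · rw [if_neg (fun hc => h1 hc.1), if_neg (fun hc => h1 hc.2.symm)]
    simp [List.map_map, Function.comp_def]
  · rw [if_neg (fun hc => h1 hc.1), if_neg (fun hc => absurd hc.1 h2)]
    simp [List.map_map, Function.comp_def]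

theorem loopM_eq (xs : List Int) (t n : Int) (rst : List (List Int)) :
    loopM xs t n rst =
      rst ++ (kSum xs 4 (n + 1) (t - pvGet xs n)).map (fun s => pvGet xs n :: s) := by
  rw [loopM, kSum_four]
  have hstep : (fun (rst : List (List Int)) (m : Int) =>
      if pvGet xs (m - 1) = pvGet xs m ∧ 1 < m - n then rst
      else loopI xs t n m rst)
      = fun rst m => rst ++ (if pvGet xs (m - 1) = pvGet xs m ∧ 1 < m - n then []
        else (kSum xs 3 (m + 1) (t - pvGet xs n - pvGet xs m)).map
          (fun s => pvGet xs n :: pvGet xs m :: s)) := by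
    funext rst m
    split_ifs with hc
    · simp
    · rw [loopI_eq]
  rw [hstep, PySem.List.foldl_append_eq_flatMap]
  have hstep2 : (fun (res : List (List Int)) (m : Int) =>
      if n + 1 < m ∧ pvGet xs m = pvGet xs (m - 1) then res
      else res ++ (kSum xs 3 (m + 1) (t - pvGet xs n - pvGet xs m)).map
        (fun sub => pvGet xs m :: sub))
      = fun res m => res ++ (if n + 1 < m ∧ pvGet xs m = pvGet xs (m - 1) then []
        else (kSum xs 3 (m + 1) (t - pvGet xs n - pvGet xs m)).map
          (fun sub => pvGet xs m :: sub)) := by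
    funext res m
    exact if_append _ _ _
  rw [hstep2, PySem.List.foldl_append_eq_flatMap]
  simp only [List.nil_append]
  rw [List.map_flatMap]
  congr 1
  congr 1
  funext m
  by_cases h1 : pvGet xs (m - 1) = pvGet xs m <;> by_cases h2 : n + 1 < m
  · rw [if_pos ⟨h1, by omega⟩, if_pos ⟨h2, h1.symm⟩]; simp
  · rw [if_neg (fun hc => absurd (show n + 1 < m from by omega) h2),
      if_neg (fun hc => absurd hc.1 h2)]
    simp [List.map_map, Function.comp_def]
  · rw [if_neg (fun hc => h1 hc.1), if_neg (fun hc => h1 hc.2.symm)]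
    simp [List.map_map, Function.comp_def]
  · rw [if_neg (fun hc => h1 hc.1), if_neg (fun hc => absurd hc.1 h2)]
    simp [List.map_map, Function.comp_def]

-- ===== VERDICT (by name: the statement is the Claim_ definition above) =====
theorem fiveSum_spec : Claim_equal_fiveSum := by
  intro nums target _
  show fiveSum nums target = fiveSum_alt nums target
  rw [fiveSum, fiveSum_alt]
  set xs := PySem.List.sorted nums (fun x => x) false with hxs
  rw [kSum_five]
  have hstep : (fun (rst : List (List Int)) (n : Int) =>
      if 0 < n ∧ pvGet xs (n - 1) = pvGet xs n then rst
      else loopM xs target n rst)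
      = fun rst n => rst ++ (if 0 < n ∧ pvGet xs (n - 1) = pvGet xs n then []
        else (kSum xs 4 (n + 1) (target - pvGet xs n)).map (fun s => pvGet xs n :: s)) := by
    funext rst n
    split_ifs with hc
    · simp
    · rw [loopM_eq]
  rw [hstep, PySem.List.foldl_append_eq_flatMap]
  have hstep2 : (fun (res : List (List Int)) (n : Int) =>
      if 0 < n ∧ pvGet xs n = pvGet xs (n - 1) then res
      else res ++ (kSum xs 4 (n + 1) (target - pvGet xs n)).map (fun sub => pvGet xs n :: sub))
      = fun res n => res ++ (if 0 < n ∧ pvGet xs n = pvGet xs (n - 1) then []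
        else (kSum xs 4 (n + 1) (target - pvGet xs n)).map (fun sub => pvGet xs n :: sub)) := by
    funext res n
    exact if_append _ _ _
  rw [hstep2, PySem.List.foldl_append_eq_flatMap]
  simp only [List.nil_append]
  congr 1
  funext n
  by_cases h1 : pvGet xs (n - 1) = pvGet xs n <;> by_cases h2 : (0:Int) < n
  · rw [if_pos ⟨h2, h1⟩, if_pos ⟨h2, h1.symm⟩]
  · rw [if_neg (fun hc => h2 hc.1), if_neg (fun hc => h2 hc.1)]
  · rw [if_neg (fun hc => h1 hc.2), if_neg (fun hc => h1 hc.2.symm)]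
  · rw [if_neg (fun hc => h2 hc.1), if_neg (fun hc => h2 hc.1)]
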